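-- pv_equiv track=rewrite | github.com/m0n1ter/www_dianping_com | tool.py | replace_score
-- ===== SOURCE A (Python) =====
-- def replace_score(x):
--     data_score={'<span class="fn-urRy"></span>':0,
--                 '<span class="fn-FJy9"></span>':2,
--                 '<span class="fn-huhQ"></span>':3,
--                 '<span class="fn-3Ywa"></span>':4,
--                 '<span class="fn-Ws1o"></span>':5,
--                 '<span class="fn-xfkY"></span>':6,
--                 '<span class="fn-zpQd"></span>':7,
--                 '<span class="fn-0lrK"></span>':8,
--                 '<span class="fn-04ho"></span>':9,
--                 }
--     if x != None:
--         for k,v in data_score.items():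
--             x = x.replace(k,str(v))
--         return x
--     else:
--         return 'null'
-- ===== SOURCE B (Python) =====
-- def replace_score(x):
--     if x is None:
--         return 'null'
--     scores = {'urRy': 0, 'FJy9': 2, 'huhQ': 3, '3Ywa': 4, 'Ws1o': 5,
--               'xfkY': 6, 'zpQd': 7, '0lrK': 8, '04ho': 9}
--     tags = {'<span class="fn-%s"></span>' % c: v for c, v in scores.items()}
--     out = []
--     i = 0
--     n = len(x)
--     while i < n:
--         tag = x[i:i + 29]      # every score tag is exactly 29 characters long
--         if tag in tags:
--             out.append(str(tags[tag]))
--             i += 29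
--         else:
--             out.append(x[i])
--             i += 1
--     return ''.join(out)
-- ===== Notes on version B (the rewrite author's own statement) =====
-- stated objective: alternative
-- what changed: A makes nine sequential whole-string .replace passes, one per span tag; B makes a single left-to-right scan that dispatches each 29-character window through the tag table, so every input character is examined once and only tags present in the input are replaced.
import Mathlib
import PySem

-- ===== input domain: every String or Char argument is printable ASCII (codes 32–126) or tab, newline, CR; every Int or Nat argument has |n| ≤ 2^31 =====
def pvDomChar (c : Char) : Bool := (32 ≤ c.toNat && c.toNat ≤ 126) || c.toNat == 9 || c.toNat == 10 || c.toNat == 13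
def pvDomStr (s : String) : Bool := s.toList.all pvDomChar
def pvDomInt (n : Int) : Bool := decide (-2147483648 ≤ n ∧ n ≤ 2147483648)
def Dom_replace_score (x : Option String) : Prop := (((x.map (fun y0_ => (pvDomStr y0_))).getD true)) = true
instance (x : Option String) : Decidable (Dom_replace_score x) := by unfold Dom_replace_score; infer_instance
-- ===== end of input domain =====

-- B replaces A's nine sequential whole-string .replace passes by a single left-to-right
-- scan dispatching each 29-char window through the tag table (objective: alternative).


-- ===== PORT A =====
-- data_score, insertion order kept
def pvDataScore : PySem.Dict String Int := PySem.Dict.mk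
  [("<span class=\"fn-urRy\"></span>", 0),
   ("<span class=\"fn-FJy9\"></span>", 2),
   ("<span class=\"fn-huhQ\"></span>", 3),
   ("<span class=\"fn-3Ywa\"></span>", 4),
   ("<span class=\"fn-Ws1o\"></span>", 5),
   ("<span class=\"fn-xfkY\"></span>", 6),
   ("<span class=\"fn-zpQd\"></span>", 7),
   ("<span class=\"fn-0lrK\"></span>", 8),
   ("<span class=\"fn-04ho\"></span>", 9)]

-- if x != None: for k,v in data_score.items(): x = x.replace(k, str(v)); return x; else: return 'null'
def replace_score (x : Option String) : String :=
  match x with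
  | some s => pvDataScore.items.foldl (fun acc kv => PySem.Str.replace acc kv.1 (PySem.Int.toStr kv.2)) s
  | none => "null"

-- ===== PORT B =====
-- B's dicts, kept at the PySem.Chars (List Char) level on which B's scan works:
-- scores (code -> value) and the comprehension building tags ('<span class="fn-%s"></span>' % c -> v)
def pvScores : List (List Char × Int) :=
  [("urRy".toList, 0), ("FJy9".toList, 2), ("huhQ".toList, 3), ("3Ywa".toList, 4),
   ("Ws1o".toList, 5), ("xfkY".toList, 6), ("zpQd".toList, 7), ("0lrK".toList, 8),
   ("04ho".toList, 9)]

def pvDataScoreB : PySem.Dict (List Char) Int :=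
  PySem.Dict.mk (pvScores.map (fun cv =>
    ("<span class=\"fn-".toList ++ cv.1 ++ "\"></span>".toList, cv.2)))

-- the while loop: tag = x[i:i+29]; if tag in data_score: emit str(data_score[tag]), i += 29; else emit x[i], i += 1
def pvScan : List Char → List Char
  | [] => []
  | c :: t =>
    match pvDataScoreB.get? ((c :: t).take 29) with
    | some v => PySem.Int.toChars v ++ pvScan (t.drop 28)
    | none => c :: pvScan t
termination_by cs => cs.length
decreasing_by all_goals simp

def replace_score_alt (x : Option String) : String :=
  match x with
  | none => "null"
  | some s => String.ofList (pvScan s.toList)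

-- ===== PRECONDITION & SPEC =====
-- Pre_ excludes strings containing "fn-<span" or "fn-0<span": only there can a span tag sit at the
-- digit position of another tag's surrounding text, so that a digit written by one of A's earlier
-- .replace passes completes a tag for a later pass and A's nine ordered passes cascade — an accident
-- of sequential replacement; B replaces exactly the tags present in the input.
def Pre_replace_score (x : Option String) : Prop :=
  PySem.Str.isIn "fn-<span" (x.getD "") = false ∧ PySem.Str.isIn "fn-0<span" (x.getD "") = false
instance (x : Option String) : Decidable (Pre_replace_score x) := by unfold Pre_replace_score; infer_instance

def pvWitness_replace_score : Option String := some "a<span class=\"fn-huhQ\"></span>b"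

def Spec_replace_score (x : Option String) (out : String) : Prop := out = replace_score_alt x
instance (x : Option String) (out : String) : Decidable (Spec_replace_score x out) := by unfold Spec_replace_score; infer_instance

-- ===== CLAIM (what is proved, stated in full; the proofs are below) =====
def Claim_equal_replace_score : Prop := ∀ (x : Option String), Dom_replace_score x → Pre_replace_score x → Spec_replace_score x (replace_score x)

-- ===== LEMMAS AND PROOFS =====

-- the score table at char level (= pvDataScoreB.items; A's items map to it key-wise)
def pvTab : List (List Char × Int) := pvDataScoreB.items

-- simple structural recursion computing Chars.replace (for old ≠ [])
def pvRep (k d : List Char) : List Char → List Char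
  | [] => []
  | c :: t =>
    if k.isPrefixOf (c :: t) ∧ k ≠ [] then d ++ pvRep k d (t.drop (k.length - 1))
    else c :: pvRep k d t
termination_by cs => cs.length
decreasing_by all_goals simp

lemma pvRep_go (old new : List Char) (hold : old ≠ []) :
    ∀ fuel l acc, l.length ≤ fuel →
      PySem.Chars.replace.go old new fuel l acc = acc.reverse ++ pvRep old new l := by
  intro fuel
  induction fuel with
  | zero =>
    intro l acc hl
    have : l = [] := List.length_eq_zero_iff.mp (Nat.le_zero.mp hl)
    subst this
    simp [PySem.Chars.replace.go, pvRep]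
  | succ n ih =>
    intro l acc hl
    match l with
    | [] => simp [PySem.Chars.replace.go, pvRep]
    | c :: t =>
      rw [PySem.Chars.replace.go]
      by_cases hp : old.isPrefixOf (c :: t)
      · have hdrop : (c :: t).drop old.length = t.drop (old.length - 1) := by
          match old, hold with
          | o :: ot, _ => simp
        rw [if_pos hp, hdrop, ih _ _ (by simp at hl ⊢; omega)]
        rw [pvRep, if_pos ⟨hp, hold⟩]
        simp
      · rw [if_neg hp, ih _ _ (by simp at hl ⊢; omega)]
        rw [pvRep, if_neg (by simp [hp])]
        simp

lemma pvReplace_eq (k d s : List Char) (hk : k ≠ []) :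
    PySem.Chars.replace s k d = pvRep k d s := by
  rw [PySem.Chars.replace, if_neg (by simpa using hk)]
  simpa using pvRep_go k d hk s.length s [] le_rfl

-- the sequential passes, at char level
def pvChain (l : List (List Char × Int)) (cs : List Char) : List Char :=
  l.foldl (fun cs kv => pvRep kv.1 (PySem.Int.toChars kv.2) cs) cs

lemma pvChain_nil (l : List (List Char × Int)) : pvChain l [] = [] := by
  induction l with
  | nil => rfl
  | cons kv l' ih =>
    rw [pvChain, List.foldl_cons]
    have : pvRep kv.1 (PySem.Int.toChars kv.2) [] = [] := by rw [pvRep]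
    rw [this]
    exact ih

lemma pvChain_append_singleton (l : List (List Char × Int)) (p : List Char × Int) (cs : List Char) :
    pvChain (l ++ [p]) cs = pvRep p.1 (PySem.Int.toChars p.2) (pvChain l cs) := by
  simp [pvChain, List.foldl_append]

-- generic scan over an association list (pvScan = pvScanT pvTab)
def pvLook (l : List (List Char × Int)) (tag : List Char) : Option Int :=
  (l.find? (fun kv => kv.1 == tag)).map (·.2)

def pvScanT (l : List (List Char × Int)) : List Char → List Char
  | [] => []
  | c :: t =>
    match pvLook l ((c :: t).take 29) with
    | some v => PySem.Int.toChars v ++ pvScanT l (t.drop 28)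
    | none => c :: pvScanT l t
termination_by cs => cs.length
decreasing_by all_goals simp

lemma pvScanT_nil (l : List (List Char × Int)) : pvScanT l [] = [] := by rw [pvScanT]

lemma pvScan_eq : ∀ cs, pvScan cs = pvScanT pvTab cs := by
  intro cs
  induction cs using pvScan.induct with
  | case1 => rw [pvScan, pvScanT]
  | case2 c t v hv ih =>
    rw [pvScan, pvScanT]
    have hv' : pvLook pvTab ((c :: t).take 29) = some v := hv
    rw [hv, hv', ih]
  | case3 c t hv ih =>
    rw [pvScan, pvScanT]
    have hv' : pvLook pvTab ((c :: t).take 29) = none := hv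
    rw [hv, hv', ih]

-- "k mismatches strictly inside v at every start position" (no k-match can begin inside v)
def pvMism (k v : List Char) : Bool :=
  (List.range v.length).all fun p =>
    (List.range (min k.length (v.length - p))).any fun q => decide (k[q]? ≠ v[p + q]?)

lemma pvMism_not_prefix {k v : List Char} (h : pvMism k v = true) (hv : v ≠ []) (u : List Char) :
    ¬ k <+: (v ++ u) := by
  intro hp
  have h0 : 0 < v.length := List.length_pos_iff.mpr hv
  have h1 := (List.all_eq_true.mp h) 0 (by simpa using h0)
  obtain ⟨q, hq, hne⟩ := List.any_eq_true.mp h1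
  simp only [List.mem_range, Nat.lt_min] at hq
  simp only [Nat.zero_add, decide_eq_true_eq] at hne
  apply hne
  have h2 : (v ++ u)[q]? = k[q]? := by
    rcases hp with ⟨w, hw⟩
    rw [← hw]
    exact List.getElem?_append_left (by omega)
  rw [← h2, List.getElem?_append_left (by omega)]

lemma pvMism_shift {k : List Char} {c : Char} {w : List Char} (h : pvMism k (c :: w) = true) :
    pvMism k w = true := by
  rw [pvMism, List.all_eq_true]
  intro p hp
  simp only [List.mem_range] at hp
  have h1 := (List.all_eq_true.mp h) (p + 1) (by simp; omega)
  obtain ⟨q, hq, hne⟩ := List.any_eq_true.mp h1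
  simp only [List.mem_range, Nat.lt_min, List.length_cons] at hq
  rw [List.any_eq_true]
  refine ⟨q, by simp only [List.mem_range, Nat.lt_min]; omega, ?_⟩
  simp only [decide_eq_true_eq] at hne ⊢
  intro heq; apply hne
  rw [show p + 1 + q = (p + q) + 1 by omega, List.getElem?_cons_succ]
  exact heq

lemma pvRep_append {k : List Char} (d : List Char) {v : List Char} (h : pvMism k v = true) :
    ∀ u, pvRep k d (v ++ u) = v ++ pvRep k d u := by
  induction v with
  | nil => intro u; simp
  | cons c w ih =>
    intro u
    have hnp := pvMism_not_prefix h (by simp) u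
    rw [List.cons_append, pvRep, if_neg (by
      rintro ⟨h1, -⟩
      exact hnp (List.isPrefixOf_iff_prefix.mp h1))]
    rw [ih (pvMism_shift h)]
    rfl

lemma pvRep_cons_not_prefix {k : List Char} (d : List Char) {c : Char} {t : List Char}
    (h : ¬ k <+: (c :: t)) : pvRep k d (c :: t) = c :: pvRep k d t := by
  rw [pvRep, if_neg (by rintro ⟨h1, -⟩; exact h (List.isPrefixOf_iff_prefix.mp h1))]

lemma pvRep_self {k : List Char} (d : List Char) (hk : k ≠ []) (u : List Char) :
    pvRep k d (k ++ u) = d ++ pvRep k d u := by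
  match k, hk with
  | a :: b, _ =>
    rw [List.cons_append, pvRep,
      if_pos ⟨List.isPrefixOf_iff_prefix.mpr ⟨u, by simp⟩, by simp⟩]
    congr 2
    simp

lemma pvChain_append_front {l : List (List Char × Int)} {v : List Char}
    (h : ∀ kv ∈ l, pvMism kv.1 v = true) (u : List Char) :
    pvChain l (v ++ u) = v ++ pvChain l u := by
  induction l generalizing u with
  | nil => rfl
  | cons kv l' ih =>
    show pvChain l' (pvRep kv.1 (PySem.Int.toChars kv.2) (v ++ u))
      = v ++ pvChain l' (pvRep kv.1 (PySem.Int.toChars kv.2) u)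
    rw [pvRep_append _ (h kv (by simp))]
    exact ih (fun a ha => h a (by simp [ha])) _

lemma pvScanT_append_front {l : List (List Char × Int)} {v : List Char}
    (h : ∀ kv ∈ l, pvMism kv.1 v = true) (u : List Char) :
    pvScanT l (v ++ u) = v ++ pvScanT l u := by
  induction v generalizing u with
  | nil => simp
  | cons c w ih =>
    rw [List.cons_append, pvScanT]
    have hfind : List.find? (fun kv => kv.1 == (c :: (w ++ u)).take 29) l = none := by
      rw [List.find?_eq_none]
      intro kv hkv hbeq
      have hk : kv.1 = (c :: (w ++ u)).take 29 := by simpa using hbeq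
      have hpre : kv.1 <+: (c :: w) ++ u := by
        rw [hk]; simpa using List.take_prefix 29 (c :: (w ++ u))
      exact pvMism_not_prefix (h kv hkv) (by simp) u hpre
    have hnone : pvLook l ((c :: (w ++ u)).take 29) = none := by rw [pvLook, hfind]; rfl
    rw [hnone, ih (fun kv hkv => pvMism_shift (h kv hkv))]
    rfl

lemma pvScanT_cons_none {l : List (List Char × Int)} {c : Char} {t : List Char}
    (h : ∀ kv ∈ l, ¬ kv.1 <+: (c :: t)) : pvScanT l (c :: t) = c :: pvScanT l t := by
  rw [pvScanT]
  have hfind : List.find? (fun kv => kv.1 == (c :: t).take 29) l = none := by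
    rw [List.find?_eq_none]
    intro kv hkv hbeq
    have hk : kv.1 = (c :: t).take 29 := by simpa using hbeq
    exact h kv hkv (hk ▸ List.take_prefix 29 (c :: t))
  have hnone : pvLook l ((c :: t).take 29) = none := by rw [pvLook, hfind]; rfl
  rw [hnone]

-- decidable facts about the concrete table
lemma pvTab_keys_len : ∀ kv ∈ pvTab, kv.1.length = 29 := by decide
lemma pvTab_key_inj : ∀ a ∈ pvTab, ∀ b ∈ pvTab, a.1 = b.1 → a = b := by decide
lemma pvTab_mism_pairs : ∀ a ∈ pvTab, ∀ b ∈ pvTab, a.1 = b.1 ∨ pvMism a.1 b.1 = true := by decide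
lemma pvTab_digit_mism : ∀ a ∈ pvTab, ∀ b ∈ pvTab, pvMism a.1 (PySem.Int.toChars b.2) = true := by decide
lemma pvTab_digit_ne_nil : ∀ kv ∈ pvTab, PySem.Int.toChars kv.2 ≠ [] := by decide

-- the cascade killer: whenever a full table key km could sit at a digit position i of another
-- key p (so that replacing km would write the digit p[i]), the seed p.take i ++ km contains one
-- of the two substrings Pre_ excludes
lemma pvKill : ∀ j, (hj : j < pvTab.length) → ∀ kv ∈ pvTab.take j, ∀ i, i < 29 →
    (pvTab[j].1)[i]? = (PySem.Int.toChars kv.2)[0]? →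
    ("fn-<span".toList <:+: (pvTab[j].1.take i ++ kv.1)) ∨
    ("fn-0<span".toList <:+: (pvTab[j].1.take i ++ kv.1)) := by decide

-- scan with a key set cannot create a key prefix out of nothing: either the window was already a
-- prefix of the input, or some full table key sits at an inner position i of the window in the input
lemma pvNP3 (l : List (List Char × Int)) (hd : ∀ kv ∈ l, PySem.Int.toChars kv.2 ≠ [])
    (k : List Char) :
    ∀ cs q, k.drop q <+: pvScanT l cs →
      k.drop q <+: cs ∨
      ∃ km vm, (km, vm) ∈ l ∧ ∃ i, q + i < k.length ∧
        k[q + i]? = (PySem.Int.toChars vm)[0]? ∧ ((k.drop q).take i ++ km) <+: cs := by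
  intro cs
  induction cs using pvScanT.induct l with
  | case1 =>
    intro q hp
    rw [pvScanT_nil] at hp
    left
    rw [List.prefix_nil.mp hp]
  | case2 c t v hv ih =>
    intro q hp
    replace hp : k.drop q <+: PySem.Int.toChars v ++ pvScanT l (t.drop 28) := by
      rw [pvScanT, hv] at hp; exact hp
    by_cases hq : k.drop q = []
    · left; rw [hq]; exact List.nil_prefix
    · right
      have hqlen : q < k.length := by
        by_contra hc
        exact hq (List.drop_eq_nil_of_le (by omega))
      obtain ⟨p, hfind⟩ : ∃ p, List.find? (fun kv => kv.1 == (c :: t).take 29) l = some p := by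
        rcases hf : List.find? (fun kv => kv.1 == (c :: t).take 29) l with _ | p
        · rw [pvLook, hf] at hv; simp at hv
        · exact ⟨p, hf⟩
      have hvm : p.2 = v := by rw [pvLook, hfind] at hv; simpa using hv
      have hmem := List.mem_of_find?_eq_some hfind
      have hkeq : p.1 = (c :: t).take 29 := by simpa using List.find?_some hfind
      have hnev : PySem.Int.toChars v ≠ [] := hvm ▸ hd p hmem
      obtain ⟨d0, ds, hds⟩ : ∃ d0 ds, PySem.Int.toChars v = d0 :: ds := by
        rcases hcc : PySem.Int.toChars v with _ | ⟨d0, ds⟩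
        · exact absurd hcc hnev
        · exact ⟨d0, ds, rfl⟩
      rw [List.drop_eq_getElem_cons hqlen, hds, List.cons_append] at hp
      have hchar := (List.cons_prefix_cons.mp hp).1
      refine ⟨p.1, p.2, by simpa using hmem, 0, by omega, ?_, ?_⟩
      · rw [hvm, hds]
        simp only [Nat.add_zero, List.getElem?_cons_zero]
        rw [List.getElem?_eq_getElem hqlen, hchar]
      · rw [List.take_zero, List.nil_append, hkeq]
        exact List.take_prefix 29 (c :: t)
  | case3 c t hv ih =>
    intro q hp
    replace hp : k.drop q <+: c :: pvScanT l t := by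
      rw [pvScanT, hv] at hp; exact hp
    by_cases hq : k.drop q = []
    · left; rw [hq]; exact List.nil_prefix
    · have hqlen : q < k.length := by
        by_contra hc
        exact hq (List.drop_eq_nil_of_le (by omega))
      rw [List.drop_eq_getElem_cons hqlen] at hp
      obtain ⟨hc1, hp'⟩ := List.cons_prefix_cons.mp hp
      rcases ih (q + 1) hp' with h | ⟨km, vm, hmem, i, hi, hchar, hseed⟩
      · left
        rw [List.drop_eq_getElem_cons hqlen, hc1]
        exact List.cons_prefix_cons.mpr ⟨rfl, h⟩
      · right
        refine ⟨km, vm, hmem, i + 1, by omega,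
          by rw [show q + (i + 1) = q + 1 + i by omega]; exact hchar, ?_⟩
        rw [List.drop_eq_getElem_cons hqlen, List.take_succ_cons, hc1, List.cons_append]
        exact List.cons_prefix_cons.mpr ⟨rfl, hseed⟩

-- Pre_ at char level, closed under passing to any contiguous part
def pvPre (cs : List Char) : Prop :=
  ¬ ("fn-<span".toList <:+: cs) ∧ ¬ ("fn-0<span".toList <:+: cs)

lemma pvPre_suffix {cs u : List Char} (h : pvPre cs) (hs : u <:+ cs) : pvPre u :=
  ⟨fun hi => h.1 (hi.trans hs.isInfix), fun hi => h.2 (hi.trans hs.isInfix)⟩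

-- the main equivalence at char level: on Pre_ inputs the nine sequential passes
-- (restricted to any prefix of the pass list) equal the single scan
lemma pvMain : ∀ n cs, cs.length ≤ n → pvPre cs → ∀ l, l <+: pvTab →
    pvChain l cs = pvScanT l cs := by
  intro n
  induction n with
  | zero =>
    intro cs hl _ l _
    have : cs = [] := List.length_eq_zero_iff.mp (Nat.le_zero.mp hl)
    subst this
    rw [pvChain_nil, pvScanT_nil]
  | succ n ih =>
    intro cs hl hpre l htab
    by_cases hex : ∃ kv ∈ pvTab, kv.1 <+: cs
    · obtain ⟨⟨k, v⟩, hmem, hpref⟩ := hex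
      obtain ⟨u, rfl⟩ := hpref
      have hk29 : k.length = 29 := pvTab_keys_len _ hmem
      have hkne : k ≠ [] := by intro h; rw [h] at hk29; simp at hk29
      have hpreu : pvPre u := pvPre_suffix hpre ⟨k, rfl⟩
      have hun : u.length ≤ n := by simp [hk29] at hl; omega
      have hIHu : pvChain l u = pvScanT l u := ih u hun hpreu l htab
      have hnodupl : (l.map (·.1)).Nodup := by
        have : (pvTab.map (·.1)).Nodup := by decide
        exact this.sublist (htab.sublist.map _)
      by_cases hin : (k, v) ∈ l
      · obtain ⟨l1, l2, rfl⟩ := List.append_of_mem hin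
        have hl1ne : ∀ kv' ∈ l1, kv'.1 ≠ k := by
          intro kv' h1 heq
          rw [List.map_append, List.map_cons] at hnodupl
          have := (List.nodup_append.mp hnodupl).2.2
          exact this kv'.1 (List.mem_map_of_mem h1) k (by simp) heq
        have hl1m : ∀ kv' ∈ l1, pvMism kv'.1 k = true := by
          intro kv' h1
          rcases pvTab_mism_pairs kv' (htab.subset (by simp [h1])) (k, v) hmem with heq | hm
          · exact absurd heq (hl1ne kv' h1)
          · exact hm
        have hl2d : ∀ kv' ∈ l2, pvMism kv'.1 (PySem.Int.toChars v) = true := by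
          intro kv' h2
          exact pvTab_digit_mism kv' (htab.subset (by simp [h2])) (k, v) hmem
        have hchain : pvChain (l1 ++ (k, v) :: l2) (k ++ u)
            = PySem.Int.toChars v ++ pvChain (l1 ++ (k, v) :: l2) u := by
          rw [pvChain, List.foldl_append, List.foldl_cons]
          rw [show List.foldl (fun cs kv => pvRep kv.1 (PySem.Int.toChars kv.2) cs) (k ++ u) l1
              = pvChain l1 (k ++ u) from rfl]
          rw [pvChain_append_front hl1m, pvRep_self _ hkne]
          rw [show ∀ w, List.foldl (fun cs kv => pvRep kv.1 (PySem.Int.toChars kv.2) cs) w l2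
              = pvChain l2 w from fun w => rfl]
          rw [pvChain_append_front hl2d]
          congr 1
          conv_rhs => rw [pvChain, List.foldl_append, List.foldl_cons]
          rfl
        have hscan : pvScanT (l1 ++ (k, v) :: l2) (k ++ u)
            = PySem.Int.toChars v ++ pvScanT (l1 ++ (k, v) :: l2) u := by
          obtain ⟨kc, kt, rfl⟩ : ∃ kc kt, k = kc :: kt := by
            cases k with
            | nil => exact absurd rfl hkne
            | cons a b => exact ⟨a, b, rfl⟩
          have hkt : kt.length = 28 := by simpa using hk29
          have htake : ((kc :: kt) ++ u).take 29 = kc :: kt := List.take_left' hk29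
          have hlook : pvLook (l1 ++ (kc :: kt, v) :: l2) ((kc :: (kt ++ u)).take 29)
              = some v := by
            rw [show kc :: (kt ++ u) = (kc :: kt) ++ u from rfl, htake, pvLook, List.find?_append]
            have h1 : List.find? (fun kv => kv.1 == kc :: kt) l1 = none := by
              rw [List.find?_eq_none]
              intro kv' h1' hbeq
              exact hl1ne kv' h1' (by simpa using hbeq)
            rw [h1, List.find?_cons_of_pos (by simp)]
            rfl
          calc pvScanT (l1 ++ (kc :: kt, v) :: l2) ((kc :: kt) ++ u)
              = PySem.Int.toChars v ++ pvScanT (l1 ++ (kc :: kt, v) :: l2) ((kt ++ u).drop 28) := by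
                rw [List.cons_append, pvScanT, hlook]
            _ = PySem.Int.toChars v ++ pvScanT (l1 ++ (kc :: kt, v) :: l2) u := by
                rw [List.drop_left' hkt]
        rw [hchain, hscan, hIHu]
      · have hmm : ∀ kv' ∈ l, pvMism kv'.1 k = true := by
          intro kv' h1
          rcases pvTab_mism_pairs kv' (htab.subset h1) (k, v) hmem with heq | hm
          · exfalso
            have : kv' = (k, v) := pvTab_key_inj kv' (htab.subset h1) (k, v) hmem heq
            exact hin (this ▸ h1)
          · exact hm
        rw [pvChain_append_front hmm, pvScanT_append_front hmm, hIHu]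
    · push Not at hex
      cases cs with
      | nil => rw [pvChain_nil, pvScanT_nil]
      | cons c t =>
        have hpret : pvPre t := pvPre_suffix hpre ⟨[c], rfl⟩
        have htl : t.length ≤ n := by simpa using hl
        have inner : ∀ l', l' <+: pvTab → pvChain l' (c :: t) = c :: pvChain l' t := by
          intro l'
          induction l' using List.reverseRecOn with
          | nil => intro _; rfl
          | append_singleton l' p ihl =>
            intro hpt
            have hl'tab : l' <+: pvTab := (List.prefix_append l' [p]).trans hpt
            have hptab : p ∈ pvTab := hpt.subset (by simp)
            rw [pvChain_append_singleton, ihl hl'tab]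
            have hct : pvChain l' t = pvScanT l' t := ih t htl hpret l' hl'tab
            rw [hct]
            have hsc : c :: pvScanT l' t = pvScanT l' (c :: t) :=
              (pvScanT_cons_none (fun kv hkv => hex kv (hl'tab.subset hkv))).symm
            have hnp : ¬ p.1 <+: c :: pvScanT l' t := by
              rw [hsc]
              intro hpr
              have hnp3 := pvNP3 l' (fun kv hkv => pvTab_digit_ne_nil kv (hl'tab.subset hkv))
                p.1 (c :: t) 0 (by simpa using hpr)
              rcases hnp3 with h | ⟨km, vm, hmeml, i, hi, hchar, hseed⟩
              · exact hex p hptab (by simpa using h)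
              · obtain ⟨r, hr⟩ := hpt
                have hj : l'.length < pvTab.length := by
                  rw [← hr]; simp
                have htake : pvTab.take l'.length = l' := by
                  rw [← hr, List.append_assoc, List.take_left]
                have hpj : pvTab[l'.length] = p := by
                  have : pvTab[l'.length]? = some p := by
                    rw [← hr, List.append_assoc, List.getElem?_append_right le_rfl]
                    simp
                  obtain ⟨_, h⟩ := List.getElem?_eq_some_iff.mp this
                  exact h
                have hi29 : i < 29 := by
                  have := pvTab_keys_len p hptab
                  omega
                have hkill := pvKill l'.length hj (km, vm) (by rw [htake]; exact hmeml)
                  i hi29 (by rw [hpj]; simpa using hchar)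
                rw [hpj] at hkill
                have hseed' : p.1.take i ++ km <+: c :: t := by simpa using hseed
                rcases hkill with hb | hb
                · exact hpre.1 (hb.trans hseed'.isInfix)
                · exact hpre.2 (hb.trans hseed'.isInfix)
            rw [pvRep_cons_not_prefix _ hnp]
            rw [← hct, ← pvChain_append_singleton]
        have hsc2 : pvScanT l (c :: t) = c :: pvScanT l t :=
          pvScanT_cons_none (fun kv hkv => hex kv (htab.subset hkv))
        rw [inner l htab, hsc2, ih t htl hpret l htab]

-- bridge: A's String-level fold equals the char-level fold
lemma pvFold_toList : ∀ (l : List (String × Int)) (s : String),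
    (l.foldl (fun acc kv => PySem.Str.replace acc kv.1 (PySem.Int.toStr kv.2)) s).toList
    = l.foldl (fun cs kv => PySem.Chars.replace cs kv.1.toList (PySem.Int.toChars kv.2)) s.toList := by
  intro l
  induction l with
  | nil => intro s; rfl
  | cons kv l' ihl =>
    intro s
    rw [List.foldl_cons, List.foldl_cons, ihl]
    congr 1
    rw [PySem.Str.toList_replace, PySem.Int.toList_toStr]

lemma pvA_toList (s : String) :
    (replace_score (some s)).toList = pvChain pvTab s.toList := by
  rw [show replace_score (some s)
      = pvDataScore.items.foldl (fun acc kv => PySem.Str.replace acc kv.1 (PySem.Int.toStr kv.2)) s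
      from rfl]
  rw [pvFold_toList]
  rw [show pvTab = pvDataScore.items.map (fun kv => (kv.1.toList, kv.2)) from by decide]
  rw [pvChain, List.foldl_map]
  exact PySem.List.foldl_congr_mem' _ _ _ _ (fun kv hkv acc => by
    apply pvReplace_eq
    intro hnil
    have h29 : kv.1.toList.length = 29 := by
      have : (kv.1.toList, kv.2) ∈ pvDataScore.items.map (fun kv => (kv.1.toList, kv.2)) :=
        List.mem_map_of_mem hkv
      rw [show pvDataScore.items.map (fun kv => (kv.1.toList, kv.2)) = pvTab from by decide] at this
      exact pvTab_keys_len _ this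
    rw [hnil] at h29
    simp at h29)

-- ===== VERDICT =====
theorem replace_score_spec : Claim_equal_replace_score := by
  intro x _ hpre
  unfold Spec_replace_score
  cases x with
  | none => rfl
  | some s =>
    have hp := hpre
    unfold Pre_replace_score at hp
    obtain ⟨h1, h2⟩ := hp
    have hpreL : pvPre s.toList := by
      constructor
      · have := (PySem.Chars.isIn_eq_false_iff "fn-<span".toList s.toList).mp (by simpa using h1)
        exact this
      · have := (PySem.Chars.isIn_eq_false_iff "fn-0<span".toList s.toList).mp (by simpa using h2)
        exact this
    apply String.toList_inj.mp
    rw [pvA_toList]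
    rw [show (replace_score_alt (some s)).toList = pvScan s.toList from String.toList_ofList]
    rw [pvScan_eq]
    exact pvMain s.toList.length s.toList le_rfl hpreL pvTab (List.prefix_refl _)
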